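-- pv_equiv track=rewrite | github.com/jconover/ai-rag-stack | backend/app/ab_testing.py | _select_variant_by_bucket
-- ===== SOURCE A (Python) =====
-- from typing import Any, Optional
--
-- def _select_variant_by_bucket(
--     bucket: int, traffic_split: dict[str, int]
-- ) -> Optional[str]:
--     """Select a variant based on bucket number and traffic split.
--
--     Traffic split is a dict like {"control": 50, "treatment": 50}.
--     Buckets 0-49 go to control, 50-99 go to treatment.
--
--     Args:
--         bucket: Bucket number (0-99)
--         traffic_split: Dict mapping variant_id to percentage
--
--     Returns:
--         Selected variant_id or None if invalid configuration
--     """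
--     if not traffic_split:
--         return None
--
--     cumulative = 0
--     for variant_id, percentage in traffic_split.items():
--         cumulative += percentage
--         if bucket < cumulative:
--             return variant_id
--
--     # Fallback to last variant if bucket >= 100 (shouldn't happen with valid splits)
--     return list(traffic_split.keys())[-1] if traffic_split else None
-- ===== SOURCE B (Python) =====
-- from typing import Any, Optional
--
--
-- def _select_variant_by_bucket(
--     bucket: int, traffic_split: dict[str, int]
-- ) -> Optional[str]:
--     """Declarative reformulation: pick the first key whose closed-form
--     prefix sum sum(vals[:i+1]) exceeds the bucket, defaulting to the
--     last key."""
--     if not traffic_split: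
--         return None
--     keys = list(traffic_split)
--     vals = list(traffic_split.values())
--     return next(
--         (k for i, k in enumerate(keys) if bucket < sum(vals[: i + 1])),
--         keys[-1],
--     )
-- ===== Notes on version B (the rewrite author's own statement) =====
-- stated objective: alternative
-- what changed: Replaces A's stateful running-accumulator loop with early return by a declarative search (next over a generator with a default) that tests each key against its closed-form prefix sum sum(vals[:i+1]).
import Mathlib
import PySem

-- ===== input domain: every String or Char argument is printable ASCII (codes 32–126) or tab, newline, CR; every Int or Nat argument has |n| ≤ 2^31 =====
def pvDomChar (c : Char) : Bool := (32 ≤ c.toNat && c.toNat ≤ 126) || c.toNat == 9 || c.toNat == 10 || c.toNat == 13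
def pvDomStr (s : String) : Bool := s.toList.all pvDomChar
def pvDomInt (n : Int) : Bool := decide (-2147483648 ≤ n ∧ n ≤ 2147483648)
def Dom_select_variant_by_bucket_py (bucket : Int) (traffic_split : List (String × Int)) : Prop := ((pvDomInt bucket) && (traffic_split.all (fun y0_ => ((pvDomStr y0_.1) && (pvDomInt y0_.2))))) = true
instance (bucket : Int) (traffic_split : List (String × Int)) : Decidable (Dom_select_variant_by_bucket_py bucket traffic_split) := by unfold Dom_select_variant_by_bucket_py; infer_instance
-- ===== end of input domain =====

-- B replaces A's running-accumulator loop by a declarative first-match search against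
-- closed-form prefix sums (alternative decomposition; no speed claim).

-- ===== PORT A =====
-- the `for variant_id, percentage in traffic_split.items(): cumulative += percentage; if bucket < cumulative: return variant_id` loop
def selVariantLoopA (bucket : Int) (cumulative : Int) : List (String × Int) → Option String
  | [] => none
  | (variant_id, percentage) :: rest =>
    let cumulative' := cumulative + percentage
    if bucket < cumulative' then some variant_id
    else selVariantLoopA bucket cumulative' rest

def select_variant_by_bucket_py (bucket : Int) (traffic_split : List (String × Int)) : Option String :=
  if traffic_split.isEmpty then none
  else
    match selVariantLoopA bucket 0 traffic_split with
    | some variant_id => some variant_id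
    | none =>
      -- `list(traffic_split.keys())[-1] if traffic_split else None`
      if traffic_split.isEmpty then none
      else PySem.List.pyGet? (traffic_split.map Prod.fst) (-1)

-- ===== PORT B =====
def select_variant_by_bucket_py_alt (bucket : Int) (traffic_split : List (String × Int)) : Option String :=
  if traffic_split.isEmpty then none
  else
    let keys := traffic_split.map Prod.fst
    let vals := traffic_split.map Prod.snd
    -- next((k for i, k in enumerate(keys) if bucket < sum(vals[:i+1])), keys[-1])
    match (PySem.List.enumerate keys 0).find?
        (fun p => decide (bucket < (PySem.List.slice vals none (some (p.1 + 1))).sum)) with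
    | some p => some p.2
    | none => PySem.List.pyGet? keys (-1)

-- ===== PRECONDITION & SPEC =====
def Spec_select_variant_by_bucket_py (bucket : Int) (traffic_split : List (String × Int)) (out : Option String) : Prop := out = select_variant_by_bucket_py_alt bucket traffic_split
instance (bucket : Int) (traffic_split : List (String × Int)) (out : Option String) : Decidable (Spec_select_variant_by_bucket_py bucket traffic_split out) := by unfold Spec_select_variant_by_bucket_py; infer_instance

-- ===== CLAIM (what is proved, stated in full; the proofs are below) =====
def Claim_equal_select_variant_by_bucket_py : Prop := ∀ (bucket : Int) (traffic_split : List (String × Int)), Dom_select_variant_by_bucket_py bucket traffic_split → Spec_select_variant_by_bucket_py bucket traffic_split (select_variant_by_bucket_py bucket traffic_split)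

-- ===== LEMMAS AND PROOFS =====

theorem pv_find?_congr_mem {α : Type} (l : List α) (p q : α → Bool)
    (h : ∀ x ∈ l, p x = q x) : l.find? p = l.find? q := by
  induction l with
  | nil => rfl
  | cons a l ih =>
    simp only [List.find?_cons]
    rw [h a (by simp)]
    cases q a
    · exact ih (fun x hx => h x (by simp [hx]))
    · rfl

theorem pv_enumerate_shift {α : Type} (xs : List α) (s : Int) :
    PySem.List.enumerate xs (s + 1) =
      (PySem.List.enumerate xs s).map (fun p => (p.1 + 1, p.2)) := by
  induction xs generalizing s with
  | nil => simp [PySem.List.enumerate_nil]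
  | cons a xs ih => simp [PySem.List.enumerate_cons, ih]

theorem pv_enumerate_one {α : Type} (xs : List α) :
    PySem.List.enumerate xs 1 =
      (PySem.List.enumerate xs 0).map (fun p => (p.1 + 1, p.2)) := by
  simpa using pv_enumerate_shift xs 0

theorem pv_loop_eq_find (bucket : Int) :
    ∀ (ts : List (String × Int)) (c : Int),
      selVariantLoopA bucket c ts =
        ((PySem.List.enumerate (ts.map Prod.fst) 0).find?
          (fun p => decide (bucket < c + (PySem.List.slice (ts.map Prod.snd) none (some (p.1 + 1))).sum))).map Prod.snd := by
  intro ts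
  induction ts with
  | nil => intro c; simp [selVariantLoopA, PySem.List.enumerate_nil]
  | cons kv rest ih =>
    intro c
    obtain ⟨k, v⟩ := kv
    simp only [List.map_cons, PySem.List.enumerate_cons, List.find?_cons]
    have h0 : PySem.List.slice (v :: rest.map Prod.snd) none (some ((0:Int) + 1)) = [v] := by
      rw [show ((0:Int) + 1) = ((1:Nat) : Int) by norm_num, PySem.List.slice_to_natCast]
      simp
    simp only [h0, List.sum_cons, List.sum_nil, add_zero]
    by_cases hb : bucket < c + v
    · simp [selVariantLoopA, hb]
    · have hd : decide (bucket < c + v) = false := decide_eq_false hb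
      simp only [selVariantLoopA, if_neg hb, hd, zero_add]
      rw [ih (c + v), pv_enumerate_one, List.find?_map]
      have hcongr :
          (PySem.List.enumerate (rest.map Prod.fst) 0).find?
              ((fun p => decide (bucket < c + (PySem.List.slice (v :: rest.map Prod.snd) none (some (p.1 + 1))).sum)) ∘
                (fun p => (p.1 + 1, p.2))) =
          (PySem.List.enumerate (rest.map Prod.fst) 0).find?
              (fun p => decide (bucket < c + v + (PySem.List.slice (rest.map Prod.snd) none (some (p.1 + 1))).sum)) := by
        apply pv_find?_congr_mem
        intro p hp
        rcases (PySem.List.mem_enumerate_iff _ _ _).1 hp with ⟨j, hj, rfl⟩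
        simp only [Function.comp]
        have hslice : PySem.List.slice (v :: rest.map Prod.snd) none (some ((0:Int) + j + 1 + 1)) =
            v :: PySem.List.slice (rest.map Prod.snd) none (some ((0:Int) + j + 1)) := by
          rw [show ((0:Int) + j + 1 + 1) = (((j + 2 : Nat)) : Int) by push_cast; ring,
              show ((0:Int) + j + 1) = (((j + 1 : Nat)) : Int) by push_cast; ring,
              PySem.List.slice_to_natCast, PySem.List.slice_to_natCast]
          simp [List.take_succ_cons]
        rw [hslice]
        simp only [List.sum_cons]
        congr 1
        congr 1
        ring
      simp only [Option.map_map]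
      congr 1
      exact hcongr.symm

-- ===== VERDICT (by name: the statement is the Claim_ definition above) =====
theorem select_variant_by_bucket_py_spec : Claim_equal_select_variant_by_bucket_py := by
  intro bucket ts _
  unfold Spec_select_variant_by_bucket_py select_variant_by_bucket_py select_variant_by_bucket_py_alt
  by_cases he : ts.isEmpty
  · simp [he]
  · simp only [he]
    rw [pv_loop_eq_find bucket ts 0]
    have hz : (fun (p : Int × String) => decide (bucket < 0 + (PySem.List.slice (ts.map Prod.snd) none (some (p.1 + 1))).sum)) =
        (fun (p : Int × String) => decide (bucket < (PySem.List.slice (ts.map Prod.snd) none (some (p.1 + 1))).sum)) := by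
      funext p; rw [decide_eq_decide]; omega
    rw [hz]
    cases hf : (PySem.List.enumerate (ts.map Prod.fst) 0).find?
        (fun p => decide (bucket < (PySem.List.slice (ts.map Prod.snd) none (some (p.1 + 1))).sum)) with
    | none => simp
    | some p => simp
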